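-- pv_equiv track=rewrite | github.com/jduverger/vmanival | myapp/lib/years.py | ylist
-- ===== SOURCE A (Python) =====
-- def ylist(dates):
--     tdate=dict()
--     for fdate in dates:
--         date = fdate[0:4]
--         if date in tdate:
--             tdate[date]+=1
--         else:
--             tdate[date]=1
--     return tdate
-- ===== SOURCE B (Python) =====
-- def ylist(dates):
--     prefixes = [d[0:4] for d in dates]
--     return {p: prefixes.count(p) for p in dict.fromkeys(prefixes)}
-- ===== Notes on version B (the rewrite author's own statement) =====
-- stated objective: idiomatic
-- what changed: Replaces A's incremental dict-membership/increment loop with a declarative two-pass form: slice all prefixes once, dedup them in first-occurrence order via dict.fromkeys, and build the result as a comprehension counting each distinct prefix with list.count.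
import Mathlib
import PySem

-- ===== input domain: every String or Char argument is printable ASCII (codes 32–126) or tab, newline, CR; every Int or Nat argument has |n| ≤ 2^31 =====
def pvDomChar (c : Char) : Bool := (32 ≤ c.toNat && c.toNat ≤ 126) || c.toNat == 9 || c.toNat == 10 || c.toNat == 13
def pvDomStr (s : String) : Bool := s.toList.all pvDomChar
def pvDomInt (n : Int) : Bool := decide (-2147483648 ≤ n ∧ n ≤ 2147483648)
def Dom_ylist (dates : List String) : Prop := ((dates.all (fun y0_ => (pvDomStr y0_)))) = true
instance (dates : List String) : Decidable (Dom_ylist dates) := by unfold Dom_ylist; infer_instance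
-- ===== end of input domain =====

-- B replaces A's incremental membership-test/increment dict loop with a declarative dedup-then-count comprehension (objective: idiomatic; same values, same key order).

-- ===== PORT A =====
def ylist (dates : List String) : List (String × Int) :=
  (dates.foldl (fun (tdate : PySem.Dict String Int) fdate =>
      let date := PySem.Str.slice fdate (some 0) (some 4)
      if tdate.contains date then tdate.modify date 0 (· + 1) else tdate.insert date 1)
    PySem.Dict.empty).items

-- ===== PORT B =====
def ylist_alt (dates : List String) : List (String × Int) :=
  let prefixes := dates.map (fun d => PySem.Str.slice d (some 0) (some 4))
  (PySem.List.dedup prefixes).map (fun p => (p, (prefixes.count p : Int)))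

-- ===== PRECONDITION & SPEC =====
def Spec_ylist (dates : List String) (out : List (String × Int)) : Prop := out = ylist_alt dates
instance (dates : List String) (out : List (String × Int)) : Decidable (Spec_ylist dates out) := by unfold Spec_ylist; infer_instance

-- ===== CLAIM (what is proved, stated in full; the proofs are below) =====
def Claim_equal_ylist : Prop := ∀ (dates : List String), Dom_ylist dates → Spec_ylist dates (ylist dates)

-- ===== LEMMAS AND PROOFS =====
-- A's loop body (membership test, then increment or initialise to 1) is exactly d[k] = d.get(k, 0) + 1.
lemma ylist_step (d : PySem.Dict String Int) (k : String) :
    (if d.contains k then d.modify k 0 (· + 1) else d.insert k 1) = d.modify k 0 (· + 1) := by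
  by_cases h : d.contains k
  · simp [h]
  · have hg : d.getD k 0 = 0 :=
      PySem.Dict.getD_of_not_contains d 0 (by simp [h])
    simp [h, PySem.Dict.insert, PySem.Dict.modify, hg]

-- ===== VERDICT (by name: the statement is the Claim_ definition above) =====
theorem ylist_spec : Claim_equal_ylist := by
  intro dates _
  unfold Spec_ylist ylist ylist_alt
  have e1 : dates.foldl (fun (tdate : PySem.Dict String Int) fdate =>
        let date := PySem.Str.slice fdate (some 0) (some 4)
        if tdate.contains date then tdate.modify date 0 (· + 1) else tdate.insert date 1)
        PySem.Dict.empty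
      = dates.foldl (fun (tdate : PySem.Dict String Int) fdate =>
          tdate.modify (PySem.Str.slice fdate (some 0) (some 4)) 0 (· + 1)) PySem.Dict.empty := by
    apply PySem.List.foldl_congr_mem
    intro acc x _
    exact ylist_step acc _
  have e2 : dates.foldl (fun (tdate : PySem.Dict String Int) fdate =>
        tdate.modify (PySem.Str.slice fdate (some 0) (some 4)) 0 (· + 1)) PySem.Dict.empty
      = PySem.Dict.counter (dates.map (fun d => PySem.Str.slice d (some 0) (some 4))) := by
    rw [PySem.Dict.counter_eq_foldl, List.foldl_map]
  simp only [e1, e2, PySem.Dict.items_counter, PySem.List.dedup_eq_ofList]
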